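-- pv_equiv track=rewrite | github.com/m-r-sar/Bioinformatics | Rosalind-Problems/Enumerating k-mers Lexicographically.py | function
-- ===== SOURCE A (Python) =====
-- def function(a, n):
--     if n == 1:
--         for x in a:
--             yield [x]
--     else:
--         for i in range(len(a)):
--             for x in function(a[:i] + a[i:], n - 1):
--                 yield [a[i]] + x
-- ===== SOURCE B (Python) =====
-- def function(a, n):
--     prefixes = [[x] for x in a]
--     for _ in range(n - 1):
--         prefixes = [p + [x] for p in prefixes for x in a]
--     for p in prefixes:
--         yield p
-- ===== Notes on version B (the rewrite author's own statement) =====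
-- stated objective: simpler
-- what changed: Replaces A's recursive generator (which re-slices the alphabet and recurses per prefix) by a single iterative loop that expands a list of prefixes n-1 times, appending each letter to every prefix.
import Mathlib
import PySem

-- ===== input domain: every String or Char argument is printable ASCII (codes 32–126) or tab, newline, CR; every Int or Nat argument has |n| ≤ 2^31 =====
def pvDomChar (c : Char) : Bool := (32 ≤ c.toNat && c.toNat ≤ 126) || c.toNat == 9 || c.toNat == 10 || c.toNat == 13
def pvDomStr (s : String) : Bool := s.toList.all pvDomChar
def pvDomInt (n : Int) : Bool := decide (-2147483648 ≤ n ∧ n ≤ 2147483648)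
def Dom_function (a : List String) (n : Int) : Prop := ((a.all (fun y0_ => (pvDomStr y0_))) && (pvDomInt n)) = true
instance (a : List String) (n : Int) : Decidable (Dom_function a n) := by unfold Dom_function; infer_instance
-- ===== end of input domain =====

-- B replaces A's recursive generator by an iterative prefix-expansion loop (simpler, non-recursive decomposition); same output order.
-- A and B are generators in Python; the ports collect the yielded lists.

-- ===== PORT A =====
-- Literal port of A's recursive generator; nested 'yield' loops become flatMap/map.
-- For n ≤ 0 with a ≠ [] the Python recurses forever (RecursionError) — those inputs are
-- outside Pre_function; the port returns [] there only to be total.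
def function (a : List String) (n : Int) : List (List String) :=
  if n = 1 then a.map (fun x => [x])
  else if _h : n ≤ 0 then []  -- Python diverges here (never when a = []); outside Pre_function
  else
    (PySem.List.pyRange 0 (a.length : Int) 1).flatMap (fun i =>
      (function (PySem.List.slice a none (some i) ++ PySem.List.slice a (some i) none) (n - 1)).map
        (fun x => (PySem.List.pyGetD a i "") :: x))
termination_by n.toNat
decreasing_by omega

-- ===== PORT B =====
-- prefixes = [[x] for x in a]; n-1 times: prefixes = [p + [x] for p in prefixes for x in a]
def function_alt (a : List String) (n : Int) : List (List String) :=
  (PySem.List.pyRange 0 (n - 1) 1).foldl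
    (fun prefixes _ => prefixes.flatMap (fun p => a.map (fun x => p ++ [x])))
    (a.map (fun x => [x]))

-- ===== PRECONDITION & SPEC =====
-- Pre_ excludes exactly the inputs (n ≤ 0 with a nonempty) on which A's recursion never terminates (RecursionError).
def Pre_function (a : List String) (n : Int) : Prop := 1 ≤ n ∨ a = []
instance (a : List String) (n : Int) : Decidable (Pre_function a n) := by unfold Pre_function; infer_instance
def pvWitness_function : List String × Int := (["A", "C"], 2)

def Spec_function (a : List String) (n : Int) (out : List (List String)) : Prop := out = function_alt a n
instance (a : List String) (n : Int) (out : List (List String)) : Decidable (Spec_function a n out) := by unfold Spec_function; infer_instance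

-- ===== CLAIM (what is proved, stated in full; the proofs are below) =====
def Claim_equal_function : Prop := ∀ (a : List String) (n : Int), Dom_function a n → Pre_function a n → Spec_function a n (function a n)

-- ===== LEMMAS AND PROOFS =====

-- the body of B's loop (append one letter at the end of every prefix)
def pvStep (a : List String) (L : List (List String)) : List (List String) :=
  L.flatMap (fun p => a.map (fun x => p ++ [x]))

-- expansion at the front (what A's outer loop does)
def pvFront (a : List String) (L : List (List String)) : List (List String) :=
  a.flatMap (fun y => L.map (fun x => y :: x))

lemma pvSlice_split (a : List String) (i : Int) :
    PySem.List.slice a none (some i) ++ PySem.List.slice a (some i) none = a := by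
  simp only [PySem.List.slice, Nat.sub_zero, List.drop_zero]
  rw [List.take_of_length_le (l := a.drop (PySem.List.clampIdx a.length i)) (by simp),
    List.take_append_drop]

lemma pvFoldl_const {α β : Type} (f : α → α) (l : List β) (init : α) :
    l.foldl (fun s _ => f s) init = f^[l.length] init := by
  induction l generalizing init with
  | nil => simp
  | cons x t ih => simp [List.foldl, ih, Function.iterate_succ_apply]

lemma pvAlt_eq_iterate (a : List String) (n : Int) :
    function_alt a n = (pvStep a)^[(n - 1).toNat] (a.map (fun x => [x])) := by
  unfold function_alt
  rw [show (n - 1).toNat = (PySem.List.pyRange 0 (n - 1) 1).length from by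
    simp [PySem.List.length_pyRange_one]]
  exact pvFoldl_const (pvStep a) _ _

lemma pvFront_base (a : List String) :
    pvFront a (a.map (fun x => [x])) = pvStep a (a.map (fun x => [x])) := by
  simp [pvFront, pvStep, List.flatMap_map, Function.comp_def]

lemma pvFront_step (a : List String) (L : List (List String)) :
    pvFront a (pvStep a L) = pvStep a (pvFront a L) := by
  simp [pvFront, pvStep, List.flatMap_map, List.map_flatMap, List.map_map, Function.comp_def,
        List.flatMap_assoc, List.cons_append]

lemma pvFront_iterate (a : List String) (k : Nat) (L : List (List String)) :
    pvFront a ((pvStep a)^[k] L) = (pvStep a)^[k] (pvFront a L) := by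
  induction k generalizing L with
  | zero => simp
  | succ m ih => rw [Function.iterate_succ_apply, Function.iterate_succ_apply, ih, pvFront_step]

lemma pvA_eq_iterate (a : List String) (k : Nat) :
    function a ((k : Int) + 1) = (pvStep a)^[k] (a.map (fun x => [x])) := by
  induction k with
  | zero => rw [function]; norm_num
  | succ m ih =>
    rw [function]
    rw [if_neg (show ¬ (((m + 1 : Nat) : Int) + 1 = 1) by push_cast; omega),
      dif_neg (show ¬ (((m + 1 : Nat) : Int) + 1 ≤ 0) by push_cast; omega)]
    have hbody : (((m + 1 : Nat) : Int) + 1) - 1 = (m : Int) + 1 := by push_cast; ring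
    have hfun : (fun i : Int =>
          (function (PySem.List.slice a none (some i) ++ PySem.List.slice a (some i) none)
              (((m + 1 : Nat) : Int) + 1 - 1)).map (fun x => (PySem.List.pyGetD a i "") :: x))
        = (fun i : Int =>
          ((pvStep a)^[m] (a.map (fun x => [x]))).map (fun x => (PySem.List.pyGetD a i "") :: x)) := by
      funext i
      rw [pvSlice_split a i, hbody, ih]
    rw [hfun]
    have hmap := PySem.List.map_pyGetD_pyRange_zero' (xs := a) (d := "")
    calc (PySem.List.pyRange 0 (a.length : Int) 1).flatMap
            (fun i => ((pvStep a)^[m] (a.map (fun x => [x]))).map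
              (fun x => (PySem.List.pyGetD a i "") :: x))
        = ((PySem.List.pyRange 0 (a.length : Int) 1).map (fun i => PySem.List.pyGetD a i "")).flatMap
            (fun y => ((pvStep a)^[m] (a.map (fun x => [x]))).map (fun x => y :: x)) := by
          rw [List.flatMap_map]
      _ = pvFront a ((pvStep a)^[m] (a.map (fun x => [x]))) := by
          rw [hmap]; rfl
      _ = (pvStep a)^[m + 1] (a.map (fun x => [x])) := by
          rw [pvFront_iterate, pvFront_base, ← Function.iterate_succ_apply]

lemma pvNil_all (n : Int) : function ([] : List String) n = [] := by
  rw [function]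
  by_cases h1 : n = 1
  · simp [h1]
  · by_cases h2 : n ≤ 0 <;> simp [h1, h2, PySem.List.pyRange_one_eq_nil]

lemma pvAltNil (n : Int) (h : n ≤ 0) : function_alt ([] : List String) n = [] := by
  unfold function_alt
  rw [PySem.List.pyRange_one_eq_nil (by omega)]
  simp

-- ===== VERDICT (by name: the statement is the Claim_ definition above) =====
theorem function_spec : Claim_equal_function := by
  intro a n _hdom hpre
  unfold Spec_function
  by_cases hn : 1 ≤ n
  · obtain ⟨k, hk⟩ : ∃ k : Nat, n = (k : Int) + 1 := ⟨(n - 1).toNat, by omega⟩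
    subst hk
    rw [pvA_eq_iterate, pvAlt_eq_iterate]
    norm_num
  · rcases hpre with h | h
    · omega
    · subst h
      rw [pvNil_all, pvAltNil n (by omega)]
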